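-- pv_equiv track=rewrite | github.com/HKervadec/Project-Euler | Problem 054/problem54.py | fourOfAKind
-- ===== SOURCE A (Python) =====
-- def countValue(hand, value):
--     total = 0
--
--     for card in hand:
--         if cardValue(card) == value:
--             total += 1
--
--     return total
--
-- def fourOfAKind(hand):
--     modifier = 15 * 7
--
--     result = -1
--
--     for card in hand:
--         if countValue(hand, cardValue(card)) == 4:
--             result = max(result, cardValue(card))
--
--     if result == -1:
--         return -1
--
--     return modifier + result
--
-- def cardValue(card):
--     return {'2':2, '3':3, '4':4, '5':5, '6':6, '7':7, '8':8, '9':9, 'T':10, 'J':11, 'Q':12, 'K':13, 'A':14}[card[0]]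
-- ===== SOURCE B (Python) =====
-- def cardValue(card):
--     return {'2':2, '3':3, '4':4, '5':5, '6':6, '7':7, '8':8, '9':9, 'T':10, 'J':11, 'Q':12, 'K':13, 'A':14}[card[0]]
--
-- def fourOfAKind(hand):
--     counts = {}
--     for card in hand:
--         v = cardValue(card)
--         counts[v] = counts.get(v, 0) + 1
--     result = -1
--     for v, n in counts.items():
--         if n == 4:
--             result = max(result, v)
--     if result == -1:
--         return -1
--     return 15 * 7 + result
-- ===== Notes on version B (the rewrite author's own statement) =====
-- stated objective: idiomatic
-- what changed: B builds a value-frequency table in one pass and scans its distinct entries for count 4, instead of A's per-card rescan of the whole hand via countValue.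
import Mathlib
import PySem

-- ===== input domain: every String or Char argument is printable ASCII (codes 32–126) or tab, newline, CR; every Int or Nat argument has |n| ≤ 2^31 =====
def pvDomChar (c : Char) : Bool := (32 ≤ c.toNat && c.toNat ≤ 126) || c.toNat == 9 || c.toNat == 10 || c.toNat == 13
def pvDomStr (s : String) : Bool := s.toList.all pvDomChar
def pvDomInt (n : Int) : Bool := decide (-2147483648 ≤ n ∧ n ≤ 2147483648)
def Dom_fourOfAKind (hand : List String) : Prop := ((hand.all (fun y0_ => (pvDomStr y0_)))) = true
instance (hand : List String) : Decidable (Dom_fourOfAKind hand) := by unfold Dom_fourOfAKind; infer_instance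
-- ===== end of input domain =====

-- B builds a frequency table of card values in one pass, then takes the max over
-- distinct values whose count is 4; A rescans the whole hand for every card.

-- ===== PORT A =====
-- shared helper: Python's cardValue(card) = {...}[card[0]]; Python raises IndexError/KeyError
-- on an empty string or an unknown rank — those hands are excluded by Pre_, where the
-- two .getD defaults below are never reached.
def cardValue (card : String) : Int :=
  (PySem.Dict.ofList [('2', (2 : Int)), ('3', 3), ('4', 4), ('5', 5), ('6', 6), ('7', 7),
      ('8', 8), ('9', 9), ('T', 10), ('J', 11), ('Q', 12), ('K', 13), ('A', 14)]).getD
    ((PySem.Str.pyGet? card 0).getD ' ') 0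

def countValue (hand : List String) (value : Int) : Int :=
  hand.foldl (fun total card => if cardValue card = value then total + 1 else total) 0

def fourOfAKind (hand : List String) : Int :=
  let modifier : Int := 15 * 7
  let result : Int :=
    hand.foldl
      (fun result card =>
        if countValue hand (cardValue card) = 4 then max result (cardValue card) else result)
      (-1)
  if result = -1 then -1 else modifier + result

-- ===== PORT B =====
def fourOfAKind_alt (hand : List String) : Int :=
  let counts : PySem.Dict Int Int :=
    hand.foldl (fun d card => d.insert (cardValue card) (d.getD (cardValue card) 0 + 1))
      PySem.Dict.empty
  let result : Int :=
    counts.items.foldl (fun result p => if p.2 = 4 then max result p.1 else result) (-1)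
  if result = -1 then -1 else 15 * 7 + result

-- ===== PRECONDITION & SPEC =====
def validCard (card : String) : Bool :=
  match card.toList with
  | [] => false
  | c :: _ => ['2', '3', '4', '5', '6', '7', '8', '9', 'T', 'J', 'Q', 'K', 'A'].contains c

-- Pre_ excludes exactly the hands on which Python A raises (IndexError on an empty card
-- string, KeyError on a first character that is not a rank).
def Pre_fourOfAKind (hand : List String) : Prop := hand.all validCard = true
instance (hand : List String) : Decidable (Pre_fourOfAKind hand) := by
  unfold Pre_fourOfAKind; infer_instance

def pvWitness_fourOfAKind : List String := ["2H", "2D", "2C", "2S", "7H"]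

def Spec_fourOfAKind (hand : List String) (out : Int) : Prop := out = fourOfAKind_alt hand
instance (hand : List String) (out : Int) : Decidable (Spec_fourOfAKind hand out) := by
  unfold Spec_fourOfAKind; infer_instance

-- ===== CLAIM (what is proved, stated in full; the proofs are below) =====
def Claim_equal_fourOfAKind : Prop :=
  ∀ (hand : List String), Dom_fourOfAKind hand → Pre_fourOfAKind hand →
    Spec_fourOfAKind hand (fourOfAKind hand)

-- ===== LEMMAS AND PROOFS =====

-- countValue is the count of `value` among the mapped card values (as an Int).
theorem countValue_eq (hand : List String) (value : Int) :
    countValue hand value = ((hand.map cardValue).count value : Int) := by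
  unfold countValue
  rw [show (fun (total : Int) card => if cardValue card = value then total + 1 else total) =
        (fun (total : Int) card =>
          if (fun c => cardValue c == value) card = true then total + 1 else total) from by
      funext t c; simp,
    PySem.List.foldl_count_if]
  simp [List.count, List.countP_map, Function.comp_def]

-- a (foldl max) is its start or one of the elements
theorem foldl_max_mem (l : List Int) (a : Int) :
    l.foldl max a = a ∨ l.foldl max a ∈ l := by
  induction l generalizing a with
  | nil => simp
  | cons y t ih =>
    simp only [List.foldl_cons]
    rcases ih (max a y) with h | h
    · rw [h]
      rcases max_choice a y with hc | hc
      · exact Or.inl hc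
      · right; rw [hc]; exact List.mem_cons_self
    · exact Or.inr (List.mem_cons_of_mem y h)

-- foldl max depends only on the start and the SET of elements
theorem foldl_max_eq_of_mem_iff (l₁ l₂ : List Int) (a : Int)
    (h : ∀ x, x ∈ l₁ ↔ x ∈ l₂) : l₁.foldl max a = l₂.foldl max a := by
  apply le_antisymm
  · rcases foldl_max_mem l₁ a with he | he
    · rw [he]; exact (PySem.List.le_foldl_max l₂ a).1
    · exact (PySem.List.le_foldl_max l₂ a).2 _ ((h _).mp he)
  · rcases foldl_max_mem l₂ a with he | he
    · rw [he]; exact (PySem.List.le_foldl_max l₁ a).1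
    · exact (PySem.List.le_foldl_max l₁ a).2 _ ((h _).mpr he)

-- the if-guarded max loop is a foldl max over the filtered list
theorem foldl_if_max_eq_filter (l : List Int) (a : Int) (q : Int → Bool) :
    l.foldl (fun r v => if q v then max r v else r) a = (l.filter q).foldl max a := by
  induction l generalizing a with
  | nil => rfl
  | cons y t ih =>
    by_cases h : q y <;> simp [h, ih]

-- both loops reduce to a foldl max over lists with the same members
theorem result_eq (hand : List String) :
    hand.foldl
      (fun result card =>
        if countValue hand (cardValue card) = 4 then max result (cardValue card) else result)
      (-1) =
    (PySem.Dict.counter (hand.map cardValue)).items.foldl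
      (fun result p => if p.2 = 4 then max result p.1 else result) (-1) := by
  rw [PySem.Dict.items_counter, List.foldl_map]
  rw [show (hand.foldl
        (fun result card =>
          if countValue hand (cardValue card) = 4 then max result (cardValue card) else result)
        (-1)) =
      ((hand.map cardValue).foldl
        (fun result v => if countValue hand v = 4 then max result v else result) (-1)) from by
    rw [List.foldl_map]]
  have hq : ∀ (l : List Int) (g : Int → Prop) [DecidablePred g],
      l.foldl (fun r v => if g v then max r v else r) (-1) =
        l.foldl (fun r v => if decide (g v) then max r v else r) (-1) := by
    intro l g _
    congr 1; funext r v; simp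
  rw [hq _ (fun v => countValue hand v = 4),
      hq _ (fun v => ((hand.map cardValue).count v : Int) = 4),
      foldl_if_max_eq_filter, foldl_if_max_eq_filter]
  apply foldl_max_eq_of_mem_iff
  intro x
  simp only [List.mem_filter, PySem.Set.mem_ofList, countValue_eq]

-- ===== VERDICT (by name: the statement is the Claim_ definition above) =====
theorem fourOfAKind_spec : Claim_equal_fourOfAKind := by
  intro hand _ _
  unfold Spec_fourOfAKind fourOfAKind fourOfAKind_alt
  rw [show (hand.foldl
        (fun d card => d.insert (cardValue card) (d.getD (cardValue card) 0 + 1))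
        PySem.Dict.empty) =
      PySem.Dict.counter (hand.map cardValue) from by
    rw [← PySem.Dict.foldl_insert_getD_add_one_eq_counter, List.foldl_map]]
  rw [result_eq]
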